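-- pv_equiv track=rewrite | github.com/DheerajMG-Bng/AI-ddr-report-generator-GenAI | analysis_engine.py | _issue_label_from_keywords
-- ===== SOURCE A (Python) =====
-- def _issue_label_from_keywords(keywords: list[str]) -> str:
--     if not keywords:
--         return "general observation"
--     for preferred in (
--         "crack",
--         "leakage",
--         "seepage",
--         "moisture",
--         "damp",
--         "mold",
--         "thermal anomaly",
--         "heat loss",
--         "hot spot",
--     ):
--         if preferred in keywords:
--             return preferred
--     return keywords[0]
-- ===== SOURCE B (Python) =====
-- _PRIORITY = {kw: rank for rank, kw in enumerate((
--     "crack",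
--     "leakage",
--     "seepage",
--     "moisture",
--     "damp",
--     "mold",
--     "thermal anomaly",
--     "heat loss",
--     "hot spot",
-- ))}
--
--
-- def _issue_label_from_keywords(keywords: list[str]) -> str:
--     if not keywords:
--         return "general observation"
--     best = None  # (rank, keyword) with the smallest rank seen so far
--     for kw in keywords:
--         rank = _PRIORITY.get(kw)
--         if rank is not None and (best is None or rank < best[0]):
--             best = (rank, kw)
--     return best[1] if best is not None else keywords[0]
-- ===== Notes on version B (the rewrite author's own statement) =====
-- stated objective: alternative
-- what changed: Replaces the scan over the fixed preferred tuple probing 'preferred in keywords' with list membership by a single pass over keywords that looks each keyword up in a precomputed rank dictionary and keeps the smallest-ranked hit, falling back to keywords[0].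
import Mathlib
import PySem

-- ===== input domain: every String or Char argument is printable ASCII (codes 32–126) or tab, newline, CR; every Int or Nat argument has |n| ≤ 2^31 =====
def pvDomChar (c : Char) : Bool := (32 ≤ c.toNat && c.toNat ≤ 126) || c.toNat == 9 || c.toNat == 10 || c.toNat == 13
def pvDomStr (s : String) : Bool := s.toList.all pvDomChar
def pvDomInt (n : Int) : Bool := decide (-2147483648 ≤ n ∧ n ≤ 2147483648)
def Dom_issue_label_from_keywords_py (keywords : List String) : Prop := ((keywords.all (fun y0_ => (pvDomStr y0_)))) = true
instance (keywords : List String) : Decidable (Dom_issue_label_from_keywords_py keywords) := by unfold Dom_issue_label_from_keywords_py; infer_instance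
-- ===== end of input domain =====

-- B replaces the scan over the fixed preferred tuple by a single pass over keywords with a
-- precomputed rank dictionary, keeping the smallest-ranked hit (objective: alternative).


-- ===== PORT A =====
-- the fixed tuple of preferred labels A iterates over
def pvPreferredList : List String :=
  ["crack", "leakage", "seepage", "moisture", "damp", "mold",
   "thermal anomaly", "heat loss", "hot spot"]

-- A's for-loop: return the first preferred label contained in keywords, none otherwise
def pvFirstPreferred (keywords : List String) : List String → Option String
  | [] => none
  | p :: ps => if keywords.contains p then some p else pvFirstPreferred keywords ps

def issue_label_from_keywords_py (keywords : List String) : String :=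
  if keywords.isEmpty then "general observation"
  else
    match pvFirstPreferred keywords pvPreferredList with
    | some p => p
    | none => keywords.headD ""   -- keywords[0]; list is non-empty here

-- ===== PORT B =====
-- _PRIORITY : label -> rank (enumerate of the preferred tuple)
def pvPriority : PySem.Dict String Int :=
  PySem.Dict.mk
    [("crack", 0), ("leakage", 1), ("seepage", 2), ("moisture", 3), ("damp", 4),
     ("mold", 5), ("thermal anomaly", 6), ("heat loss", 7), ("hot spot", 8)]

-- loop body: keep the (rank, keyword) pair with the smallest rank seen so far
def pvStep (best : Option (Int × String)) (kw : String) : Option (Int × String) :=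
  match PySem.Dict.get? pvPriority kw with
  | none => best
  | some r =>
    match best with
    | none => some (r, kw)
    | some (br, _) => if r < br then some (r, kw) else best

def issue_label_from_keywords_py_alt (keywords : List String) : String :=
  if keywords.isEmpty then "general observation"
  else
    match keywords.foldl pvStep none with
    | some (_, kw) => kw
    | none => keywords.headD ""   -- keywords[0]; list is non-empty here

-- ===== PRECONDITION & SPEC =====
def Spec_issue_label_from_keywords_py (keywords : List String) (out : String) : Prop := out = issue_label_from_keywords_py_alt keywords
instance (keywords : List String) (out : String) : Decidable (Spec_issue_label_from_keywords_py keywords out) := by unfold Spec_issue_label_from_keywords_py; infer_instance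

-- ===== CLAIM (what is proved, stated in full; the proofs are below) =====
def Claim_equal_issue_label_from_keywords_py : Prop := ∀ (keywords : List String), Dom_issue_label_from_keywords_py keywords → Spec_issue_label_from_keywords_py keywords (issue_label_from_keywords_py keywords)

-- ===== LEMMAS AND PROOFS =====

-- merge two candidates, keeping the one with the strictly smaller rank (left wins ties)
def pvMerge (a b : Option (Int × String)) : Option (Int × String) :=
  match b with
  | none => a
  | some (r, _) =>
    match a with
    | none => b
    | some (ar, _) => if r < ar then b else a

-- rank lookup as an optional (rank, keyword) pair
def pvPairOf (kw : String) : Option (Int × String) :=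
  (PySem.Dict.get? pvPriority kw).map (fun r => (r, kw))

-- A's search over a (key, rank) pair list
def pvFindP (kws : List String) : List (String × Int) → Option (Int × String)
  | [] => none
  | (p, r) :: ps => if kws.contains p then some (r, p) else pvFindP kws ps

-- A's search over the preferred list, paired with the ranks of the preferred labels
def pvFindPair (keywords : List String) : Option (Int × String) :=
  (pvFirstPreferred keywords pvPreferredList).map
    (fun p => ((PySem.Dict.get? pvPriority p).getD 0, p))

theorem pvMerge_assoc (a b c : Option (Int × String)) :
    pvMerge (pvMerge a b) c = pvMerge a (pvMerge b c) := by
  rcases a with _ | ⟨ar, ak⟩ <;> rcases b with _ | ⟨br, bk⟩ <;> rcases c with _ | ⟨cr, ck⟩ <;>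
    simp only [pvMerge]
  all_goals try split_ifs
  all_goals try rfl
  all_goals try (simp only [pvMerge]; try split_ifs)
  all_goals first | rfl | (exfalso; omega)

theorem pvStep_eq_merge (b : Option (Int × String)) (kw : String) :
    pvStep b kw = pvMerge b (pvPairOf kw) := by
  rcases h : PySem.Dict.get? pvPriority kw with _ | r <;>
    rcases b with _ | ⟨br, bk⟩ <;> simp [pvStep, pvPairOf, pvMerge, h]

-- any hit of pvFindP has a rank above a common lower bound of the pair list
theorem pvFindP_lb (kws : List String) (lb : Int) :
    ∀ ps : List (String × Int), (∀ pr ∈ ps, lb < pr.2) →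
      ∀ q, pvFindP kws ps = some q → lb < q.1
  | [], _, q, h => by simp [pvFindP] at h
  | (p, r) :: ps, hlb, q, h => by
    rw [pvFindP] at h
    split_ifs at h with hc
    · cases h; exact hlb (p, r) (by simp)
    · exact pvFindP_lb kws lb ps (fun pr hpr => hlb pr (List.mem_cons_of_mem _ hpr)) q h

-- a keyword absent from the dictionary never affects A's search
theorem pvFindP_cons_none (kws : List String) (k : String)
    (hk : PySem.Dict.get? pvPriority k = none) :
    ∀ ps : List (String × Int),
      (∀ pr ∈ ps, PySem.Dict.get? pvPriority pr.1 = some pr.2) →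
      pvFindP (k :: kws) ps = pvFindP kws ps
  | [], _ => rfl
  | (p, r) :: ps, hks => by
    have hkp : k ≠ p := by
      intro h; subst h
      have := hks (k, r) (by simp)
      simp [hk] at this
    rw [pvFindP, pvFindP, List.contains_cons,
      show (p == k) = false by simp [Ne.symm hkp]]
    simp only [Bool.false_or]
    split_ifs
    · rfl
    · exact pvFindP_cons_none kws k hk ps (fun pr hpr => hks pr (List.mem_cons_of_mem _ hpr))

-- a keyword with rank r merges into A's search as the candidate (r, k)
theorem pvFindP_cons_some (kws : List String) (k : String) (r : Int)
    (hk : PySem.Dict.get? pvPriority k = some r) :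
    ∀ ps : List (String × Int),
      (∀ pr ∈ ps, PySem.Dict.get? pvPriority pr.1 = some pr.2) →
      List.Pairwise (fun a b => a.2 < b.2) ps →
      (k, r) ∈ ps →
      pvFindP (k :: kws) ps = pvMerge (some (r, k)) (pvFindP kws ps)
  | [], _, _, hmem => by simp at hmem
  | (p, r0) :: ps, hks, hsort, hmem => by
    by_cases hkp : k = p
    · subst hkp
      have hr : r = r0 := by
        have := hks (k, r0) (by simp)
        rw [hk] at this; exact (Option.some.injEq _ _).mp this
      subst hr
      rw [pvFindP, pvFindP, List.contains_cons, show (k == k) = true by simp]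
      simp only [Bool.true_or, if_true]
      split_ifs with hc
      · simp [pvMerge]
      · rcases hq : pvFindP kws ps with _ | ⟨qr, qk⟩
        · simp [pvMerge]
        · have hlt : r < qr := by
            refine pvFindP_lb kws r ps ?_ _ hq
            intro pr hpr
            exact (List.pairwise_cons.mp hsort).1 pr hpr
          simp [pvMerge, show ¬ qr < r by omega]
    · have hmem' : (k, r) ∈ ps := by
        rcases List.mem_cons.mp hmem with h | h
        · exact absurd (congrArg Prod.fst h) hkp
        · exact h
      rw [pvFindP, pvFindP, List.contains_cons, show (p == k) = false by simp [Ne.symm hkp]]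
      simp only [Bool.false_or]
      have hr0 : r0 < r := (List.pairwise_cons.mp hsort).1 (k, r) hmem'
      split_ifs with hc
      · simp [pvMerge, hr0]
      · exact pvFindP_cons_some kws k r hk ps
          (fun pr hpr => hks pr (List.mem_cons_of_mem _ hpr))
          (List.pairwise_cons.mp hsort).2 hmem'

-- A's literal search equals pvFindP over the dictionary's item list
theorem pvFindPair_eq_findP (kws : List String) :
    pvFindPair kws = pvFindP kws pvPriority.items := by
  have gen : ∀ ps : List (String × Int),
      (∀ pr ∈ ps, PySem.Dict.get? pvPriority pr.1 = some pr.2) →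
      (pvFirstPreferred kws (ps.map Prod.fst)).map
        (fun p => ((PySem.Dict.get? pvPriority p).getD 0, p)) = pvFindP kws ps := by
    intro ps
    induction ps with
    | nil => intro _; rfl
    | cons pr ps ih =>
      intro hks
      rcases pr with ⟨p, r⟩
      rw [List.map_cons, pvFirstPreferred, pvFindP]
      split_ifs
      · simp [hks (p, r) (by simp)]
      · exact ih (fun pr hpr => hks pr (List.mem_cons_of_mem _ hpr))
  have h1 : pvPreferredList = (pvPriority.items).map Prod.fst := by decide
  have h2 : ∀ pr ∈ pvPriority.items, PySem.Dict.get? pvPriority pr.1 = some pr.2 := by decide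
  rw [pvFindPair, h1, gen pvPriority.items h2]

theorem pvFindPair_cons (k : String) (kws : List String) :
    pvFindPair (k :: kws) = pvMerge (pvPairOf k) (pvFindPair kws) := by
  rw [pvFindPair_eq_findP, pvFindPair_eq_findP, pvPairOf]
  have h2 : ∀ pr ∈ pvPriority.items, PySem.Dict.get? pvPriority pr.1 = some pr.2 := by decide
  rcases hk : PySem.Dict.get? pvPriority k with _ | r
  · rw [pvFindP_cons_none kws k hk pvPriority.items h2]
    rcases pvFindP kws pvPriority.items with _ | ⟨a, b⟩ <;> rfl
  · have hsort : List.Pairwise (fun a b => a.2 < b.2) pvPriority.items := by decide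
    have hmem : (k, r) ∈ pvPriority.items :=
      PySem.Dict.mem_items_of_get?_eq_some pvPriority hk
    rw [pvFindP_cons_some kws k r hk pvPriority.items h2 hsort hmem]
    simp

theorem pvFold_eq (kws : List String) (b : Option (Int × String)) :
    kws.foldl pvStep b = pvMerge b (pvFindPair kws) := by
  induction kws generalizing b with
  | nil => simp [pvFindPair, pvFirstPreferred, pvPreferredList, pvMerge]
  | cons k kws ih =>
    rw [List.foldl_cons, ih, pvStep_eq_merge, pvMerge_assoc, pvFindPair_cons]

-- ===== VERDICT (by name: the statement is the Claim_ definition above) =====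
theorem issue_label_from_keywords_py_spec : Claim_equal_issue_label_from_keywords_py := by
  intro keywords _
  unfold Spec_issue_label_from_keywords_py issue_label_from_keywords_py issue_label_from_keywords_py_alt
  rw [pvFold_eq]
  rcases h : pvFirstPreferred keywords pvPreferredList with _ | p <;>
    simp [pvFindPair, h, pvMerge]
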